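-- pv_equiv track=rewrite | github.com/seong954t/KakaoAlgorithms | Level 2/땅따먹기 게임/main.py | solution
-- ===== SOURCE A (Python) =====
-- def solution(land):
--     result = [land[0], land[1]]
--     prev = 0
--     current = 1
--     size = len(land[0])
--     # 땅따먹기 게임으로 얻을 수 있는 최대 점수는?
--     for row in land[1:]:
--         for i in range(size):
--             result[current][i] = max(result[prev][:i]+result[prev][i+1:])+row[i]
--         prev, current = current, prev
--     return max(result[prev])
-- ===== SOURCE B (Python) =====
-- def solution(land):
--     dp = list(land[0])
--     for row in land[1:]:
--         # top-two maxima of dp (with multiplicity)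
--         m1, m2 = (dp[0], dp[1]) if dp[0] >= dp[1] else (dp[1], dp[0])
--         for v in dp[2:]:
--             if v >= m1:
--                 m1, m2 = v, m1
--             elif v > m2:
--                 m2 = v
--         dp = [(m2 if v == m1 else m1) + x for v, x in zip(dp, row)]
--     return max(dp)
-- ===== Notes on version B (the rewrite author's own statement) =====
-- stated objective: faster
-- what changed: B replaces A's inner scan 'max of previous row without column i' (rebuilt by slicing for every column) with one pass per row that keeps the top-two maxima of the previous DP row, and keeps a single dp list instead of A's two alternating buffers (A also mutates land[0]/land[1] in place; B does not - the claim is about the return value).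
-- outside the precondition, e.g. on solution([[1, 2], [3, 4, 7], [5, 6, 9]]): A returns 13, B returns 11
import Mathlib
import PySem

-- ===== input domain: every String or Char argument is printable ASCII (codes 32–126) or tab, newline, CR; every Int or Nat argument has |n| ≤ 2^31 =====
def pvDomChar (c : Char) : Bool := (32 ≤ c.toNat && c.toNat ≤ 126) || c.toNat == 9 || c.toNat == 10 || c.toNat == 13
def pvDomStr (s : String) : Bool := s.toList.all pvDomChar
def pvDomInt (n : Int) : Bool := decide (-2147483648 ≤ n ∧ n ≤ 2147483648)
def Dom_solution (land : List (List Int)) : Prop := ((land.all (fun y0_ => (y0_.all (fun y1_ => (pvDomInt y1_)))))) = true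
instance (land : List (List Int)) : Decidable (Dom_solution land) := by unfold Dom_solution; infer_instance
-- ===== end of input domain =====

-- B replaces A's per-column "max of previous row without column i" slice scan by a single
-- top-two-maxima pass per row; A also mutates land[0]/land[1] in place, B does not — the
-- equivalence proved here is about the return value only.


-- Python max(xs) for a list of ints; 0 only where Python raises ValueError (excluded by Pre_)
def pyMax (xs : List Int) : Int := (PySem.List.max? xs (fun y => y)).getD 0

-- ===== PORT A =====
def solution (land : List (List Int)) : Int :=
  let r0 := land.getD 0 []        -- result = [land[0], land[1]], prev = 0, current = 1
  let r1 := land.getD 1 []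
  let size := r0.length
  let fin := (PySem.List.slice land (some 1) none).foldl
    (fun (st : List Int × List Int) row =>
      ((List.range size).foldl (fun c i =>
          c.set i (pyMax (PySem.List.slice st.1 none (some (i : Int)) ++
                          PySem.List.slice st.1 (some ((i : Int) + 1)) none) +
                   (PySem.List.pyGet? row (i : Int)).getD 0)) st.2,
       st.1))                     -- prev, current = current, prev
    (r0, r1)
  pyMax fin.1

-- ===== PORT B =====
def topTwo (a b : Int) (rest : List Int) : Int × Int :=
  rest.foldl (fun p v => if p.1 ≤ v then (v, p.1) else if p.2 < v then (p.1, v) else p)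
    (if b ≤ a then (a, b) else (b, a))

def solution_alt (land : List (List Int)) : Int :=
  let dpFin := (land.drop 1).foldl (fun dp row =>
      match dp with
      | a :: b :: rest =>
        let t := topTwo a b rest
        ((a :: b :: rest).zip row).map (fun p => (if p.1 = t.1 then t.2 else t.1) + p.2)
      | _ => dp)                  -- unreachable inside Pre_ (Python B raises IndexError on dp[1])
    (land.getD 0 [])
  pyMax dpFin

-- ===== PRECONDITION & SPEC =====
-- Pre_ excludes inputs where A raises (fewer than 2 rows, a later row narrower than the first,
-- fewer than 2 columns) and ragged grids whose first two rows are wider than the first row's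
-- width, on which A's reuse of the untouched trailing cells of land[0]/land[1] is accidental.
def Pre_solution (land : List (List Int)) : Prop :=
  2 ≤ land.length ∧ 2 ≤ (land.headD []).length ∧
  (land.getD 1 []).length = (land.headD []).length ∧
  ∀ row ∈ land.drop 2, (land.headD []).length ≤ row.length
instance (land : List (List Int)) : Decidable (Pre_solution land) := by
  unfold Pre_solution; infer_instance
def pvWitness_solution : List (List Int) := [[1, 2], [3, 4]]
def Spec_solution (land : List (List Int)) (out : Int) : Prop := out = solution_alt land
instance (land : List (List Int)) (out : Int) : Decidable (Spec_solution land out) := by unfold Spec_solution; infer_instance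

-- ===== CLAIM (what is proved, stated in full; the proofs are below) =====
def Claim_equal_solution : Prop := ∀ (land : List (List Int)), Dom_solution land → Pre_solution land → Spec_solution land (solution land)

-- ===== LEMMAS AND PROOFS =====

-- the B-side row step, named for the proofs
def stepB (dp row : List Int) : List Int :=
  match dp with
  | a :: b :: rest =>
    let t := topTwo a b rest
    ((a :: b :: rest).zip row).map (fun p => (if p.1 = t.1 then t.2 else t.1) + p.2)
  | _ => dp

-- the invariant of B's top-two scan, over the multiset of values seen so far
def TopTwoInv (s : Multiset Int) (p : Int × Int) : Prop :=
  p.1 ∈ s ∧ p.2 ∈ s.erase p.1 ∧ (∀ x ∈ s, x ≤ p.1) ∧ (∀ x ∈ s.erase p.1, x ≤ p.2)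

theorem topTwoInv_step (s : Multiset Int) (p : Int × Int) (v : Int) (h : TopTwoInv s p) :
    TopTwoInv (v ::ₘ s) (if p.1 ≤ v then (v, p.1) else if p.2 < v then (p.1, v) else p) := by
  obtain ⟨h1, h2, h3, h4⟩ := h
  by_cases hv : p.1 ≤ v
  · simp only [if_pos hv, TopTwoInv]
    refine ⟨Multiset.mem_cons_self v s, ?_, ?_, ?_⟩
    · simpa [Multiset.erase_cons_head] using h1
    · intro x hx
      rcases Multiset.mem_cons.mp hx with rfl | hx
      · exact le_refl x
      · exact le_trans (h3 x hx) hv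
    · simpa [Multiset.erase_cons_head] using h3
  · have hvlt : v < p.1 := lt_of_not_ge hv
    by_cases hv2 : p.2 < v
    · simp only [if_neg hv, if_pos hv2, TopTwoInv]
      refine ⟨Multiset.mem_cons_of_mem h1, ?_, ?_, ?_⟩
      · rw [Multiset.erase_cons_tail_of_mem h1]
        exact Multiset.mem_cons_self v _
      · intro x hx
        rcases Multiset.mem_cons.mp hx with rfl | hx
        · exact le_of_lt hvlt
        · exact h3 x hx
      · rw [Multiset.erase_cons_tail_of_mem h1]
        intro x hx
        rcases Multiset.mem_cons.mp hx with rfl | hx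
        · exact le_refl x
        · exact le_trans (h4 x hx) (le_of_lt hv2)
    · simp only [if_neg hv, if_neg hv2, TopTwoInv]
      have hvle2 : v ≤ p.2 := le_of_not_gt hv2
      refine ⟨Multiset.mem_cons_of_mem h1, ?_, ?_, ?_⟩
      · rw [Multiset.erase_cons_tail_of_mem h1]
        exact Multiset.mem_cons_of_mem h2
      · intro x hx
        rcases Multiset.mem_cons.mp hx with rfl | hx
        · exact le_of_lt hvlt
        · exact h3 x hx
      · rw [Multiset.erase_cons_tail_of_mem h1]
        intro x hx
        rcases Multiset.mem_cons.mp hx with rfl | hx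
        · exact hvle2
        · exact h4 x hx

theorem topTwoInv_foldl (rest : List Int) : ∀ (s : Multiset Int) (p : Int × Int), TopTwoInv s p →
    TopTwoInv (s + ↑rest)
      (rest.foldl (fun p v => if p.1 ≤ v then (v, p.1) else if p.2 < v then (p.1, v) else p) p) := by
  induction rest with
  | nil => intro s p h; simpa using h
  | cons v tl ih =>
    intro s p h
    have hs : s + (↑(v :: tl) : Multiset Int) = v ::ₘ (s + ↑tl) := by
      simp only [← Multiset.singleton_add]; abel
    rw [List.foldl_cons, hs, ← Multiset.cons_add]
    exact ih (v ::ₘ s) _ (topTwoInv_step s p v h)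

theorem topTwo_inv (a b : Int) (rest : List Int) :
    TopTwoInv (↑(a :: b :: rest) : Multiset Int) (topTwo a b rest) := by
  have hbase : TopTwoInv (a ::ₘ b ::ₘ 0) (if b ≤ a then (a, b) else (b, a)) := by
    by_cases hba : b ≤ a
    · rw [if_pos hba]
      refine ⟨by simp, by simp [Multiset.erase_cons_head], ?_, ?_⟩
      · intro x hx
        rcases Multiset.mem_cons.mp hx with rfl | hx
        · exact le_refl x
        · simp at hx; subst hx; exact hba
      · simp [Multiset.erase_cons_head]
    · rw [if_neg hba]
      have hab : a ≤ b := le_of_not_ge hba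
      refine ⟨by simp, ?_, ?_, ?_⟩
      · have : (a ::ₘ b ::ₘ 0).erase b = a ::ₘ 0 := by
          rw [Multiset.erase_cons_tail_of_mem (by simp), Multiset.erase_cons_head]
        rw [this]; simp
      · intro x hx
        rcases Multiset.mem_cons.mp hx with rfl | hx
        · exact hab
        · simp at hx; subst hx; exact le_refl x
      · have : (a ::ₘ b ::ₘ 0).erase b = a ::ₘ 0 := by
          rw [Multiset.erase_cons_tail_of_mem (by simp), Multiset.erase_cons_head]
        rw [this]; simp
  have hs : (a ::ₘ b ::ₘ 0) + (↑rest : Multiset Int) = (↑(a :: b :: rest) : Multiset Int) := by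
    simp only [← Multiset.singleton_add]; abel
  have := topTwoInv_foldl rest (a ::ₘ b ::ₘ 0) _ hbase
  rw [hs] at this
  exact this

-- Python max(xs) is the unique member that bounds the list
theorem pyMax_eq_of (xs : List Int) (m : Int) (hne : xs ≠ []) (hm : m ∈ xs)
    (hb : ∀ x ∈ xs, x ≤ m) : pyMax xs = m := by
  obtain ⟨m', hm'⟩ := Option.ne_none_iff_exists'.mp
    (fun h => hne ((PySem.List.max?_eq_none_iff xs (fun y => y)).mp h))
  have h1 : m' ∈ xs := PySem.List.max?_mem hm'
  have h2 : ∀ y ∈ xs, y ≤ m' := PySem.List.max?_isMax hm'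
  have : m' = m := le_antisymm (hb m' h1) (h2 m hm)
  simp [pyMax, hm', this]

-- max of a list with index i removed, via the top-two pair
theorem pyMax_removeIdx (l : List Int) (t : Int × Int) (i : Nat) (hi : i < l.length)
    (h2 : 2 ≤ l.length) (ht : TopTwoInv (↑l : Multiset Int) t) :
    pyMax (l.take i ++ l.drop (i + 1)) = if l[i] = t.1 then t.2 else t.1 := by
  obtain ⟨ht1, ht2, ht3, ht4⟩ := ht
  set u := l.take i ++ l.drop (i + 1) with hu
  have hmulti : (↑l : Multiset Int) = l[i] ::ₘ (↑u : Multiset Int) := by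
    conv_lhs => rw [← List.take_append_drop i l]
    rw [List.drop_eq_getElem_cons hi]
    simp only [hu, ← Multiset.coe_add, ← Multiset.cons_coe, ← Multiset.singleton_add]
    abel
  have hlen : u.length + 1 = l.length := by
    simp [hu]; omega
  have hne : u ≠ [] := by
    intro h; rw [h] at hlen; simp at hlen; omega
  have herase : (↑l : Multiset Int).erase l[i] = (↑u : Multiset Int) := by
    rw [hmulti, Multiset.erase_cons_head]
  by_cases hcase : l[i] = t.1
  · rw [if_pos hcase]
    apply pyMax_eq_of u t.2 hne
    · have : t.2 ∈ (↑l : Multiset Int).erase l[i] := by rw [hcase]; exact ht2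
      rw [herase] at this; simpa using this
    · intro x hx
      apply ht4
      rw [hcase] at herase
      rw [herase]
      simpa using hx
  · rw [if_neg hcase]
    apply pyMax_eq_of u t.1 hne
    · have : t.1 ∈ (↑l : Multiset Int).erase l[i] :=
        (Multiset.mem_erase_of_ne (fun h => hcase h.symm)).mpr ht1
      rw [herase] at this; simpa using this
    · intro x hx
      apply ht3
      have : x ∈ (↑u : Multiset Int) := by simpa using hx
      rw [← herase] at this
      exact Multiset.mem_of_mem_erase this

-- A's inner write loop on a full-length buffer is the range map
theorem foldl_set_range (f : Nat → Int) (n : Nat) :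
    ∀ cur : List Int, n ≤ cur.length →
    (List.range n).foldl (fun c i => c.set i (f i)) cur = (List.range n).map f ++ cur.drop n := by
  induction n with
  | zero => intro cur h; simp
  | succ n ih =>
    intro cur h
    rw [List.range_succ, List.foldl_append, ih cur (by omega)]
    have hn : n < cur.length := by omega
    simp only [List.foldl_cons, List.foldl_nil]
    have hlen : ((List.range n).map f).length = n := by simp
    rw [List.set_append_right _ _ (by omega)]
    rw [List.drop_eq_getElem_cons hn]
    simp only [hlen, Nat.sub_self, List.set_cons_zero]
    simp

theorem stepB_length (dp row : List Int) (n : Nat) (hn : 2 ≤ n) (hdp : dp.length = n)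
    (hrow : n ≤ row.length) : (stepB dp row).length = n := by
  match dp, hdp with
  | [], hdp => simp at hdp; omega
  | [x], hdp => simp at hdp; omega
  | a :: b :: rest, hdp =>
    simp only [stepB, List.length_map, List.length_zip]
    simp only [List.length_cons] at hdp
    simp only [List.length_cons]
    omega

-- one row step of A equals one row step of B
theorem step_eq (dp cur row : List Int) (n : Nat) (hn : 2 ≤ n) (hdp : dp.length = n)
    (hcur : cur.length = n) (hrow : n ≤ row.length) :
    (List.range n).foldl (fun c i =>
        c.set i (pyMax (PySem.List.slice dp none (some (i : Int)) ++
                        PySem.List.slice dp (some ((i : Int) + 1)) none) +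
                 (PySem.List.pyGet? row (i : Int)).getD 0)) cur = stepB dp row := by
  rw [foldl_set_range _ n cur (by omega)]
  rw [show cur.drop n = [] from List.drop_of_length_le (by omega), List.append_nil]
  match dp, hdp with
  | [], hdp => simp at hdp; omega
  | [x], hdp => simp at hdp; omega
  | a :: b :: rest, hdp =>
    simp only [List.length_cons] at hdp
    have ht := topTwo_inv a b rest
    have hll : (a :: b :: rest).length = n := by simp only [List.length_cons]; omega
    apply List.ext_getElem
    · simp only [stepB, List.length_map, List.length_zip, List.length_range, List.length_cons]
      omega
    · intro i h1 h2'
      have hi : i < n := by simpa using h1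
      have hil : i < (a :: b :: rest).length := by omega
      have hirow : i < row.length := by omega
      simp only [stepB, List.getElem_map, List.getElem_zip, List.getElem_range]
      have hs1 : PySem.List.slice (a :: b :: rest) none (some (i : Int)) = (a :: b :: rest).take i :=
        PySem.List.slice_to_natCast _ i
      have hs2 : PySem.List.slice (a :: b :: rest) (some ((i : Int) + 1)) none = (a :: b :: rest).drop (i + 1) := by
        have hc : ((i : Int) + 1) = ((i + 1 : Nat) : Int) := by push_cast; ring
        rw [hc, PySem.List.slice_from_natCast]
      have hg : (PySem.List.pyGet? row (i : Int)).getD 0 = row[i] := by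
        rw [PySem.List.pyGet?_natCast]
        simp [List.getElem?_eq_getElem hirow]
      rw [hs1, hs2, hg, pyMax_removeIdx (a :: b :: rest) (topTwo a b rest) i hil (by simp) ht]

-- the whole loop: A's (prev, cur) state tracks B's dp
theorem loop_eq (n : Nat) (hn : 2 ≤ n) : ∀ (rows : List (List Int)) (dp cur : List Int),
    dp.length = n → cur.length = n → (∀ row ∈ rows, n ≤ row.length) →
    (rows.foldl
      (fun (st : List Int × List Int) row =>
        ((List.range n).foldl (fun c i =>
            c.set i (pyMax (PySem.List.slice st.1 none (some (i : Int)) ++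
                            PySem.List.slice st.1 (some ((i : Int) + 1)) none) +
                     (PySem.List.pyGet? row (i : Int)).getD 0)) st.2,
         st.1)) (dp, cur)).1
      = rows.foldl (fun dp row => stepB dp row) dp := by
  intro rows
  induction rows with
  | nil => intro dp cur _ _ _; rfl
  | cons row tl ih =>
    intro dp cur hdp hcur hall
    rw [List.foldl_cons, List.foldl_cons]
    have hrow : n ≤ row.length := hall row (by simp)
    have hstep : (List.range n).foldl (fun c i =>
        c.set i (pyMax (PySem.List.slice dp none (some (i : Int)) ++
                        PySem.List.slice dp (some ((i : Int) + 1)) none) +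
                 (PySem.List.pyGet? row (i : Int)).getD 0)) cur = stepB dp row :=
      step_eq dp cur row n hn hdp hcur hrow
    simp only [hstep]
    exact ih (stepB dp row) dp (stepB_length dp row n hn hdp hrow) hdp
      (fun r hr => hall r (by simp [hr]))

theorem solution_eq_alt (land : List (List Int)) (hPre : Pre_solution land) :
    solution land = solution_alt land := by
  obtain ⟨hlen, hcols, hr1, hrows⟩ := hPre
  match land, hlen with
  | r0 :: r1 :: rows, _ =>
    simp only [List.headD_cons] at hcols hr1 hrows
    have halt : solution_alt (r0 :: r1 :: rows)
        = pyMax (((r0 :: r1 :: rows).drop 1).foldl (fun dp row => stepB dp row) r0) := rfl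
    rw [halt]
    show pyMax ((PySem.List.slice (r0 :: r1 :: rows) (some 1) none).foldl _ (r0, r1)).1 = _
    rw [PySem.List.slice_from_one]
    have hr1' : r1.length = r0.length := by simpa using hr1
    have := loop_eq r0.length hcols (r1 :: rows) r0 r1 rfl hr1'
      (by
        intro row hrow
        rcases List.mem_cons.mp hrow with rfl | h
        · omega
        · exact hrows row (by simpa using h))
    exact congrArg pyMax this

-- ===== VERDICT (by name: the statement is the Claim_ definition above) =====
theorem solution_spec : Claim_equal_solution := by
  intro land _ hPre
  show solution land = solution_alt land
  exact solution_eq_alt land hPre
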